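-- pv_equiv track=rewrite | github.com/REBELDOT-SOLUTIONS-S-R-L/ROBOTICS-lehome-challenge | scripts/mimicgen/visualize_pose_trace.py | _select_episode_rows
-- ===== SOURCE A (Python) =====
-- from typing import Any
--
-- def _select_episode_rows(rows: list[dict[str, Any]], env_id: int, episode_arg: str) -> tuple[list[dict[str, Any]], int | None]:
--     env_rows = [row for row in rows if row.get("env_id") == env_id]
--     if not env_rows:
--         return [], None
--
--     episode_ids = sorted(
--         {int(row["episode_index"]) for row in env_rows if row.get("episode_index") is not None}
--     )
--     if not episode_ids:
--         return env_rows, None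
--
--     episode_index = episode_ids[-1] if episode_arg == "latest" else int(episode_arg)
--     episode_rows = [row for row in env_rows if row.get("episode_index") == episode_index]
--     return episode_rows, episode_index
-- ===== SOURCE B (Python) =====
-- def _select_episode_rows(rows, env_id, episode_arg):
--     env_rows = []
--     groups = {}
--     max_id = None
--     for row in rows:
--         if row.get("env_id") == env_id:
--             env_rows.append(row)
--             key = row.get("episode_index")
--             groups.setdefault(key, []).append(row)
--             if key is not None:
--                 i = int(key)
--                 max_id = i if max_id is None or i > max_id else max_id
--     if not env_rows:
--         return [], None
--     if max_id is None:
--         return env_rows, None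
--     episode_index = max_id if episode_arg == "latest" else int(episode_arg)
--     return groups.get(episode_index, []), episode_index
-- ===== Notes on version B (the rewrite author's own statement) =====
-- stated objective: alternative
-- what changed: B makes a single pass over rows that simultaneously collects the env rows, groups them in a dict keyed by the raw episode_index value, and tracks the running maximum id, so A's set-building, sort and second filter pass disappear; the answer is a dict lookup.
import Mathlib
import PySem

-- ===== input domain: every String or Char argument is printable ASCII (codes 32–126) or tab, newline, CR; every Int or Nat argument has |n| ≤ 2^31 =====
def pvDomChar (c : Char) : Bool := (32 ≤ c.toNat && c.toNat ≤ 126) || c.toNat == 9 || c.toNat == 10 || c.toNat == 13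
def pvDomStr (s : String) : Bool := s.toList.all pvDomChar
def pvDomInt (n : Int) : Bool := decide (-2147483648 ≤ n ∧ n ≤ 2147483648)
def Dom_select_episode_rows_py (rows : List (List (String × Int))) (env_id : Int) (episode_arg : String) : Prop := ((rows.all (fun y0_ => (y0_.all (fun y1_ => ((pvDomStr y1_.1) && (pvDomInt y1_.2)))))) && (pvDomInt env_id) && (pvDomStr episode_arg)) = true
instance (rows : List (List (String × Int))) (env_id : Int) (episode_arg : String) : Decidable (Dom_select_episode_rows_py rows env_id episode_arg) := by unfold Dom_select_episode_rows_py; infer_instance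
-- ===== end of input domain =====

-- B replaces A's three passes over the matching rows (set comprehension, sort, second filter)
-- by ONE pass that groups the env rows by their raw episode_index value and tracks the running
-- maximum id; objective: alternative (single-pass) implementation.

-- shared primitive: Python's row.get(k) on an association-list row (first match)
def rowGet (row : List (String × Int)) (k : String) : Option Int :=
  (PySem.Dict.mk row).get? k

-- ===== PORT A =====
def select_episode_rows_py (rows : List (List (String × Int))) (env_id : Int) (episode_arg : String) : (List (List (String × Int))) × Option Int :=
  let env_rows := rows.filter (fun row => rowGet row "env_id" == some env_id)
  if env_rows = [] then ([], none)
  else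
    -- sorted({int(row["episode_index"]) for row in env_rows if row.get("episode_index") is not None})
    -- values are Ints, so int(·) is the identity
    let episode_ids := PySem.List.sorted (PySem.Set.ofList (env_rows.filterMap (fun row => rowGet row "episode_index"))) (fun x => x) false
    if episode_ids = [] then (env_rows, none)
    else
      -- episode_ids[-1]: the branch guarantees episode_ids ≠ [], so pyGetD with default 0 is exact;
      -- int(episode_arg) raises ValueError when ofStr? = none — excluded by Pre_ (getD 0 unreachable there)
      let episode_index := if episode_arg == "latest" then PySem.List.pyGetD episode_ids (-1) 0 else (PySem.Int.ofStr? episode_arg).getD 0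
      (env_rows.filter (fun row => rowGet row "episode_index" == some episode_index), some episode_index)

-- ===== PORT B =====
-- one fold over rows carrying (env_rows, groups, max_id)
def selStep (env_id : Int)
    (st : List (List (String × Int)) × PySem.Dict (Option Int) (List (List (String × Int))) × Option Int)
    (row : List (String × Int)) :
    List (List (String × Int)) × PySem.Dict (Option Int) (List (List (String × Int))) × Option Int :=
  if rowGet row "env_id" == some env_id then
    let key := rowGet row "episode_index"
    ( st.1 ++ [row],
      st.2.1.modify key [] (fun l => l ++ [row]),   -- groups.setdefault(key, []).append(row)
      match key, st.2.2 with
      | none,   m       => m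
      | some i, none    => some i
      | some i, some mm => if i > mm then some i else some mm )
  else st

def select_episode_rows_py_alt (rows : List (List (String × Int))) (env_id : Int) (episode_arg : String) : (List (List (String × Int))) × Option Int :=
  let st := rows.foldl (selStep env_id) ([], PySem.Dict.empty, none)
  if st.1 = [] then ([], none)
  else
    match st.2.2 with
    | none => (st.1, none)
    | some mx =>
      let episode_index := if episode_arg == "latest" then mx else (PySem.Int.ofStr? episode_arg).getD 0
      (st.2.1.getD (some episode_index) [], some episode_index)

-- ===== PRECONDITION & SPEC =====
-- Pre_ excludes exactly the inputs where A (and B alike) raises ValueError from int(episode_arg):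
-- episode_arg neither "latest" nor an int literal while some env-matching row carries an episode_index.
def Pre_select_episode_rows_py (rows : List (List (String × Int))) (env_id : Int) (episode_arg : String) : Prop :=
  episode_arg = "latest" ∨ (PySem.Int.ofStr? episode_arg).isSome = true ∨
  (∀ row ∈ rows, ¬ (rowGet row "env_id" = some env_id ∧ (rowGet row "episode_index").isSome = true))
instance (rows : List (List (String × Int))) (env_id : Int) (episode_arg : String) : Decidable (Pre_select_episode_rows_py rows env_id episode_arg) := by unfold Pre_select_episode_rows_py; infer_instance

def pvWitness_select_episode_rows_py : (List (List (String × Int))) × Int × String :=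
  ([[("env_id", 1), ("episode_index", 3)], [("env_id", 1), ("episode_index", 5)], [("env_id", 2)]], 1, "latest")

def Spec_select_episode_rows_py (rows : List (List (String × Int))) (env_id : Int) (episode_arg : String) (out : (List (List (String × Int))) × Option Int) : Prop := out = select_episode_rows_py_alt rows env_id episode_arg
instance (rows : List (List (String × Int))) (env_id : Int) (episode_arg : String) (out : (List (List (String × Int))) × Option Int) : Decidable (Spec_select_episode_rows_py rows env_id episode_arg out) := by unfold Spec_select_episode_rows_py; infer_instance

-- ===== CLAIM (what is proved, stated in full; the proofs are below) =====
def Claim_equal_select_episode_rows_py : Prop := ∀ (rows : List (List (String × Int))) (env_id : Int) (episode_arg : String), Dom_select_episode_rows_py rows env_id episode_arg → Pre_select_episode_rows_py rows env_id episode_arg → Spec_select_episode_rows_py rows env_id episode_arg (select_episode_rows_py rows env_id episode_arg)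

-- ===== LEMMAS AND PROOFS =====

theorem loop_char (env_id : Int) (rows : List (List (String × Int)))
    (e : List (List (String × Int))) (g : PySem.Dict (Option Int) (List (List (String × Int)))) (m : Option Int) :
    rows.foldl (selStep env_id) (e, g, m) =
      ( e ++ rows.filter (fun row => rowGet row "env_id" == some env_id),
        ((rows.filter (fun row => rowGet row "env_id" == some env_id)).map
            (fun r => (rowGet r "episode_index", r))).foldl (fun d p => d.modify p.1 [] (fun l => l ++ [p.2])) g,
        ((rows.filter (fun row => rowGet row "env_id" == some env_id)).filterMap
            (fun row => rowGet row "episode_index")).foldl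
          (fun m i => match m with | none => some i | some mm => if i > mm then some i else some mm) m ) := by
  induction rows generalizing e g m with
  | nil => simp
  | cons row t ih =>
    by_cases hp : (rowGet row "env_id" == some env_id) = true
    · simp only [List.foldl_cons, List.filter_cons, hp, if_pos, List.map_cons,
        List.filterMap_cons, selStep, ih]
      cases hk : rowGet row "episode_index" <;> cases m <;> simp
    · simp only [List.foldl_cons, List.filter_cons, hp, Bool.false_eq_true, if_neg,
        selStep, ih]
      simp

theorem mstep_some (L : List Int) (a : Int) :
    L.foldl (fun m i => match m with | none => some i | some mm => if i > mm then some i else some mm) (some a)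
      = some (L.foldl max a) := by
  induction L generalizing a with
  | nil => rfl
  | cons x t ih =>
    have h : (if x > a then some x else some a) = some (max a x) := by
      rcases max_cases a x with ⟨h1, h2⟩ | ⟨h1, h2⟩ <;> rw [h1] <;> split <;> first | rfl | omega
    simp only [List.foldl_cons]
    rw [h, ih]

theorem mfold_eq_max? (L : List Int) :
    L.foldl (fun m i => match m with | none => some i | some mm => if i > mm then some i else some mm) none
      = PySem.List.max? L (fun y => y) := by
  cases L with
  | nil => rfl
  | cons x t => simp only [List.foldl_cons, mstep_some, PySem.List.max?_id_cons]

theorem le_getLast_of_pairwise (S : List Int) (h : S.Pairwise (· < ·)) (hne : S ≠ []) :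
    ∀ x ∈ S, x ≤ S.getLast hne := by
  induction S with
  | nil => simp
  | cons a t ih =>
    rcases List.pairwise_cons.mp h with ⟨ha, ht⟩
    intro x hx
    rcases List.mem_cons.mp hx with rfl | hxt
    · cases t with
      | nil => simp
      | cons b u =>
        rw [List.getLast_cons (by simp)]
        exact le_of_lt (ha _ (List.getLast_mem _))
    · cases t with
      | nil => simp at hxt
      | cons b u =>
        rw [List.getLast_cons (by simp)]
        exact ih ht (by simp) x hxt

theorem pyGetD_neg_one (S : List Int) (h : S ≠ []) (d : Int) :
    PySem.List.pyGetD S (-1) d = S.getLast h := by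
  cases S with
  | nil => exact absurd rfl h
  | cons a t =>
    simp [PySem.List.pyGetD, PySem.List.pyGet?, PySem.List.pyIdx?]
    rw [List.getLast_eq_getElem]
    simp only [List.length_cons, Nat.add_sub_cancel]
    rfl

theorem select_episode_rows_py_spec : Claim_equal_select_episode_rows_py := by
  intro rows env_id episode_arg _ _
  unfold Spec_select_episode_rows_py select_episode_rows_py select_episode_rows_py_alt
  rw [loop_char]
  simp only [List.nil_append]
  set p := fun row : List (String × Int) => rowGet row "env_id" == some env_id with hpdef
  set E := rows.filter p with hE
  set L := E.filterMap (fun row => rowGet row "episode_index") with hL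
  by_cases hEnil : E = []
  · simp [hEnil]
  · simp only [if_neg hEnil, mfold_eq_max?]
    have hgroups : ∀ c, ((E.map (fun r => (rowGet r "episode_index", r))).foldl
        (fun d p => d.modify p.1 [] (fun l => l ++ [p.2])) PySem.Dict.empty).getD c []
        = E.filter (fun r => rowGet r "episode_index" == c) := by
      intro c
      rw [PySem.Dict.getD_foldl_modify_append]
      simp [List.filter_map, Function.comp_def]
    by_cases hLnil : L = []
    · have hS : PySem.Set.ofList L = ([] : List Int) := by rw [hLnil]; rfl
      have hmn : PySem.List.max? L (fun y => y) = none := by rw [hLnil]; rfl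
      have hsn : PySem.List.sorted ([] : List Int) (fun x => x) false = [] := rfl
      simp [hS, hmn, hsn]
    · have hSet : PySem.Set.ofList L ≠ [] := by
        cases hcL : L with
        | nil => exact absurd hcL hLnil
        | cons x t =>
          intro hc
          have hx : x ∈ PySem.Set.ofList L := (PySem.Set.mem_ofList _ _).mpr (by rw [hcL]; simp)
          rw [hcL, hc] at hx
          simp at hx
      have hSnil : PySem.List.sorted (PySem.Set.ofList L) (fun x => x) false ≠ [] := by
        intro hc
        exact hSet ((PySem.List.sorted_eq_nil_iff _ _ _).mp hc)
      obtain ⟨mx, hmx⟩ : ∃ mx, PySem.List.max? L (fun y => y) = some mx := by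
        cases hcL : L with
        | nil => exact absurd hcL hLnil
        | cons x t => exact ⟨t.foldl max x, by exact PySem.List.max?_id_cons ..⟩
      set S := PySem.List.sorted (PySem.Set.ofList L) (fun x => x) false with hSdef
      have hlast : PySem.List.pyGetD S (-1) 0 = mx := by
        rw [pyGetD_neg_one S hSnil]
        have hmemS : ∀ x, x ∈ S ↔ x ∈ L := by
          intro x
          rw [hSdef, PySem.List.mem_sorted]
          exact PySem.Set.mem_ofList _ _
        have h1 : S.getLast hSnil ≤ mx :=
          PySem.List.max?_isMax hmx _ ((hmemS _).mp (List.getLast_mem _))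
        have h2 : mx ≤ S.getLast hSnil :=
          le_getLast_of_pairwise S (PySem.List.sorted_ofList_pairwise_lt L) hSnil mx
            ((hmemS _).mpr (PySem.List.max?_mem hmx))
        omega
      simp only [if_neg hSnil, hmx, hlast, hgroups]
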